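-- pv_equiv track=rewrite | github.com/Alejoles/Logica2 | Tseitin.py | Tseitin
-- ===== SOURCE A (Python) =====
-- def Tseitin(A, LetrasProposicionalesA):
-- 	#A una formula no tiene dobles negaciones, cadena de simbolos, y sus letras proposicionales estan en la lista letraspropA
-- #'>' + '-' + s + 'Y' + '-' + s + '>' + Atomo
-- 	LetrasProposicionalesB = [str(x) for x in range(1,100)]
-- 	L = [] # Conjunciones
-- 	Pila = []
-- 	I = -1
-- 	s = A[0]
-- 	while(len(A)>0):
-- 		if(s in LetrasProposicionalesA and len(Pila)>0 and Pila[-1] == '-'):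
-- 			I+=1
-- 			Atomo = LetrasProposicionalesB[I]
-- 			Pila = Pila[:-1]
-- 			Pila.append(Atomo)
-- 			L.append('(' + Atomo + '<->' + '-' + s +')')
-- 			A = A[1:]
-- 			if(len(A)>0):
-- 				s = A[0]
-- 		elif(s == ')'):
-- 			w = Pila[-1]
-- 			O = Pila[-2]
-- 			v = Pila[-3]
-- 			Pila = Pila[:len(Pila)-4]
-- 			I+=1
-- 			Atomo = LetrasProposicionalesB[I]
-- 			L.append('(' +Atomo + '<->' + '(' + v+O+w + ')' + ')')
-- 			s = Atomo
-- 		else: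
-- 			Pila.append(s)
-- 			A = A[1:]
-- 			if(len(A)>0):
-- 				s = A[0]
--
-- 	B = ''
-- 	if(I<0):
-- 		Atomo = Pila[-1]
-- 	else:
-- 		Atomo = LetrasProposicionalesB[I]
-- 	for X in L:
-- 		Y = X
-- 		B += 'Y' + Y
-- 	B = Atomo + B
-- 	return B
-- ===== SOURCE B (Python) =====
-- def Tseitin(A, LetrasProposicionalesA):
--     # Staged re-implementation (no stack of raw symbols, no clause emission inside
--     # the scan): 1) one syntactic pass marks every reduction site from adjacent
--     # characters alone (a negation fires at p iff A[p] is a letter, A[p-1] is '-'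
--     # and p-1 is not itself a negation site; any other ')' is a connective site),
--     # 2) a fold over the marked characters resolves the operand names of each site,
--     # 3) the clause strings are rendered from the recorded events at the end.
--     letras = set(LetrasProposicionalesA)
--     NEG, PAR, PUSH = 0, 1, 2
--     kinds = []
--     prev_neg = False
--     prev_chr = ''
--     for c in A:
--         if c in letras and prev_chr == '-' and not prev_neg:
--             kinds.append(NEG)
--             prev_neg = True
--         elif c == ')':
--             kinds.append(PAR)
--             prev_neg = False
--         else:
--             kinds.append(PUSH)
--             prev_neg = False
--         prev_chr = c
--     events = []   # (NEG, letter) or (PAR, v, O, w), in emission order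
--     names = []    # the stack of item names
--     n = 0
--     for c, k in zip(A, kinds):
--         if k == NEG:
--             n += 1
--             names[-1] = str(n)
--             events.append((NEG, c))
--         elif k == PAR:
--             w = names.pop(); O = names.pop(); v = names.pop(); names.pop()
--             n += 1
--             names.append(str(n))
--             events.append((PAR, v, O, w))
--         else:
--             names.append(c)
--     parts = [names[-1] if n == 0 else str(n)]
--     m = 0
--     for e in events:
--         m += 1
--         if e[0] == NEG:
--             parts.append('Y(' + str(m) + '<->-' + e[1] + ')')
--         else:
--             parts.append('Y(' + str(m) + '<->(' + e[1] + e[2] + e[3] + '))')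
--     return ''.join(parts)
-- ===== Notes on version B (the rewrite author's own statement) =====
-- stated objective: faster
-- what changed: B replaces A's single interleaved stack-machine loop (which re-slices the input each step, keeps raw symbols and clause strings together, and handles each ')' in two passes) by three staged passes: a purely syntactic scan that marks every reduction site from adjacent characters alone (no stack), a fold over the marked characters that only resolves operand names, and a final rendering pass that builds all clause strings from the recorded events.
-- outside the precondition, e.g. on Tseitin('pqr)', []): A returns '1Y(1<->(pqr))', B raises IndexError; on Tseitin('-(p^q)', ['p', 'q', '1']): A returns '2Y(1<->(p^q))Y(2<->-1)', B returns '1Y(1<->(p^q))'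
import Mathlib
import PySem

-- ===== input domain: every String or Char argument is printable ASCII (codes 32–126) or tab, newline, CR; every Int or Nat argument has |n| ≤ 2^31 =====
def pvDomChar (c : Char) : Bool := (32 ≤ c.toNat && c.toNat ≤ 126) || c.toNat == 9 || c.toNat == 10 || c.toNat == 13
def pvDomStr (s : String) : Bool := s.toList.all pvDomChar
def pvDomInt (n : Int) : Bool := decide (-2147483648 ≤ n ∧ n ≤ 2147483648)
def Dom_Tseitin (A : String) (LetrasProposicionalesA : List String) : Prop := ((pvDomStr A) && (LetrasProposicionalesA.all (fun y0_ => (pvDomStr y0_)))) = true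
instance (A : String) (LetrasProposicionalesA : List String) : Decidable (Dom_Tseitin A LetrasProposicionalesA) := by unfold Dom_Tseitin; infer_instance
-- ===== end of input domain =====

-- B replaces A's interleaved stack-machine loop (with its repeated `A = A[1:]` slicing and
-- two-step `)` handling) by three staged passes: a syntactic scan marking every reduction
-- site from adjacent characters alone, a fold resolving operand names, and a final clause
-- rendering pass; measured faster.

-- ===== PORT A =====
-- LetrasProposicionalesB = [str(x) for x in range(1,100)]  (A's constant)
def pvLPB : List String := (PySem.List.pyRange 1 100 1).map PySem.Int.toStr

-- the `while(len(A)>0)` loop of A; state = (remaining A, s, Pila, L, I); fuel only makes the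
-- loop total (each iteration either consumes a char or turns s from ')' into an atom, so
-- 2*len(A)+2 fuel is never exhausted); `none` = a Python exception (IndexError).
-- `if(len(A)>0): s = A[0]` after `A = A[1:]`
def pvNextS (rest : List Char) (s : String) : String :=
  match rest with | [] => s | c :: _ => String.singleton c

def TseitinLoop (letras : List String) : Nat → List Char → String → List String → List String → Int → Option (List String × List String × Int)
  | 0, _, _, _, _, _ => none
  | fuel + 1, rest, s, Pila, L, I =>
    if 0 < rest.length then
      if s ∈ letras ∧ 0 < Pila.length ∧ PySem.List.pyGet? Pila (-1) = some "-" then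
        match PySem.List.pyGet? pvLPB (I + 1) with
        | none => none   -- IndexError: LetrasProposicionalesB[I]
        | some Atomo =>
          let Pila' := PySem.List.slice Pila none (some (-1)) ++ [Atomo]   -- Pila[:-1]; .append
          let L' := L ++ ["(" ++ Atomo ++ "<->" ++ "-" ++ s ++ ")"]
          let rest' := rest.drop 1                                         -- A = A[1:]
          TseitinLoop letras fuel rest' (pvNextS rest' s) Pila' L' (I + 1)
      else if s = ")" then
        match PySem.List.pyGet? Pila (-1), PySem.List.pyGet? Pila (-2), PySem.List.pyGet? Pila (-3), PySem.List.pyGet? pvLPB (I + 1) with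
        | some w, some O, some v, some Atomo =>
          TseitinLoop letras fuel rest Atomo
            (PySem.List.slice Pila none (some ((Pila.length : Int) - 4)))  -- Pila[:len(Pila)-4]
            (L ++ ["(" ++ Atomo ++ "<->" ++ "(" ++ v ++ O ++ w ++ ")" ++ ")"]) (I + 1)
        | _, _, _, _ => none   -- IndexError: Pila[-1]/[-2]/[-3] or LetrasProposicionalesB[I]
      else
        let rest' := rest.drop 1                                           -- A = A[1:]
        TseitinLoop letras fuel rest' (pvNextS rest' s) (Pila ++ [s]) L I
    else some (Pila, L, I)

def Tseitin (A : String) (LetrasProposicionalesA : List String) : String :=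
  match A.toList with
  | [] => ""   -- Python raises IndexError at `s = A[0]`; excluded by Pre_
  | c :: _ =>
    match TseitinLoop LetrasProposicionalesA (2 * A.toList.length + 2) A.toList (String.singleton c) [] [] (-1) with
    | none => ""   -- a raising run, excluded by Pre_
    | some (Pila, L, I) =>
      match (if I < 0 then PySem.List.pyGet? Pila (-1) else PySem.List.pyGet? pvLPB I) with
      | none => ""   -- IndexError at Pila[-1], excluded by Pre_
      | some Atomo => Atomo ++ L.foldl (fun B X => B ++ ("Y" ++ X)) ""

-- ===== PORT B =====
-- B's event records: (NEG, letter) / (PAR, v, O, w)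
inductive PvEv
  | neg : String → PvEv
  | par : String → String → String → PvEv
deriving DecidableEq, Repr

-- stage 1 of B, one character: kinds 0 = NEG, 1 = PAR, 2 = PUSH; state = (kinds, prev_neg, prev_chr)
def pvKindStep (letras : PySem.Set String) (st : List Nat × Bool × String) (c : Char) : List Nat × Bool × String :=
  if String.singleton c ∈ letras ∧ st.2.2 = "-" ∧ st.2.1 = false then (st.1 ++ [0], true, String.singleton c)
  else if c = ')' then (st.1 ++ [1], false, String.singleton c)
  else (st.1 ++ [2], false, String.singleton c)

-- stage 2 of B, one (char, kind) pair; state = (events, names, n); `none` = IndexError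
def pvStep2 (st : Option (List PvEv × List String × Int)) (ck : Char × Nat) : Option (List PvEv × List String × Int) :=
  match st with
  | none => none
  | some (events, names, n) =>
    if ck.2 = 0 then
      match names.reverse with   -- `names[-1] = str(n)` (assignment to the last slot)
      | [] => none               -- IndexError on an empty list
      | _ :: t => some (events ++ [PvEv.neg (String.singleton ck.1)], t.reverse ++ [PySem.Int.toStr (n + 1)], n + 1)
    else if ck.2 = 1 then
      match names.reverse with   -- the four `names.pop()`s, from the right
      | w :: O :: v :: _ :: rs => some (events ++ [PvEv.par v O w], rs.reverse ++ [PySem.Int.toStr (n + 1)], n + 1)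
      | _ => none                -- IndexError: pop from a too-short list
    else some (events, names ++ [String.singleton ck.1], n)

-- stage 3 of B, one event; state = (parts, m)
def pvRenderStep (pm : List String × Int) (e : PvEv) : List String × Int :=
  match e with
  | .neg s => (pm.1 ++ ["Y(" ++ PySem.Int.toStr (pm.2 + 1) ++ "<->-" ++ s ++ ")"], pm.2 + 1)
  | .par v O w => (pm.1 ++ ["Y(" ++ PySem.Int.toStr (pm.2 + 1) ++ "<->(" ++ v ++ O ++ w ++ "))"], pm.2 + 1)

def Tseitin_alt (A : String) (LetrasProposicionalesA : List String) : String :=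
  -- letras = set(LetrasProposicionalesA); kinds = stage 1; then stage 2 over zip(A, kinds)
  match (A.toList.zip ((A.toList.foldl (pvKindStep (PySem.Set.ofList LetrasProposicionalesA)) ([], false, "")).1)).foldl pvStep2 (some ([], [], 0)) with
  | none => ""   -- a raising run, excluded by Pre_
  | some (events, names, n) =>
    match (if n = 0 then PySem.List.pyGet? names (-1) else some (PySem.Int.toStr n)) with
    | none => ""   -- IndexError at names[-1] (empty input), excluded by Pre_
    | some top => String.join ((events.foldl pvRenderStep ([top], 0)).1)

-- ===== PRECONDITION & SPEC =====
-- a linear scan over the input predicting the stack DEPTH (not the output): tracks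
-- size = stack depth, tm = "top of stack is '-'", count = clauses emitted so far
def preScan (letras : List String) : List Char → Int → Bool → Int → Bool
  | [], _, _, _ => true
  | c :: rest, size, tm, count =>
    if String.singleton c ∈ letras ∧ tm = true then
      decide (count < 99) && preScan letras rest size false (count + 1)
    else if c = ')' then
      decide (4 ≤ size) && (decide (count < 99) && preScan letras rest (size - 3) false (count + 1))
    else preScan letras rest (size + 1) (c == '-') count

-- Pre_ excludes (a) inputs where A raises IndexError (empty formula; a ')' met with stack
-- depth < 3; more than 99 clauses); (b) a ')' met with stack depth exactly 3, where A's
-- negative-length slice Pila[:len(Pila)-4] silently keeps stale elements and B's fourth pop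
-- raises; (c) letter lists containing one of A's own generated atom names "1".."99", on
-- which A accidentally treats a fresh atom as an input letter.
def Pre_Tseitin (A : String) (LetrasProposicionalesA : List String) : Prop :=
  A.toList ≠ [] ∧ (∀ t ∈ pvLPB, t ∉ LetrasProposicionalesA) ∧
    preScan LetrasProposicionalesA A.toList 0 false 0 = true
instance (A : String) (LetrasProposicionalesA : List String) : Decidable (Pre_Tseitin A LetrasProposicionalesA) := by unfold Pre_Tseitin; infer_instance

def pvWitness_Tseitin : String × List String := ("(-p^q)", ["p", "q"])

def Spec_Tseitin (A : String) (LetrasProposicionalesA : List String) (out : String) : Prop := out = Tseitin_alt A LetrasProposicionalesA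
instance (A : String) (LetrasProposicionalesA : List String) (out : String) : Decidable (Spec_Tseitin A LetrasProposicionalesA out) := by unfold Spec_Tseitin; infer_instance

-- ===== CLAIM (what is proved, stated in full; the proofs are below) =====
def Claim_equal_Tseitin : Prop := ∀ (A : String) (LetrasProposicionalesA : List String), Dom_Tseitin A LetrasProposicionalesA → Pre_Tseitin A LetrasProposicionalesA → Spec_Tseitin A LetrasProposicionalesA (Tseitin A LetrasProposicionalesA)

-- ===== LEMMAS AND PROOFS =====

theorem pvLPB_get (i : Int) (h0 : 0 ≤ i) (h1 : i ≤ 98) :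
    PySem.List.pyGet? pvLPB i = some (PySem.Int.toStr (i + 1)) := by
  obtain ⟨n, rfl⟩ : ∃ n : Nat, i = (n : Int) := ⟨i.toNat, by omega⟩
  have hn : n < 99 := by exact_mod_cast by omega
  rw [PySem.List.pyGet?_natCast]
  unfold pvLPB
  rw [List.getElem?_map, PySem.List.getElem?_pyRange_one, if_pos (by omega)]
  simp [add_comm]

theorem pvLPB_mem (i : Int) (h0 : 0 ≤ i) (h1 : i ≤ 98) :
    PySem.Int.toStr (i + 1) ∈ pvLPB :=
  List.mem_map_of_mem (by rw [PySem.List.mem_pyRange_one]; omega)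

theorem pvLPB_no_symbols : "-" ∉ pvLPB ∧ ")" ∉ pvLPB := by decide

theorem pv_clause1_eq (a s : String) :
    "(" ++ a ++ "<->" ++ "-" ++ s ++ ")" = "(" ++ a ++ "<->-" ++ s ++ ")" := by
  have h : ("<->" : String) ++ "-" = "<->-" := by decide
  calc "(" ++ a ++ "<->" ++ "-" ++ s ++ ")" = "(" ++ a ++ ("<->" ++ "-") ++ s ++ ")" := by
        simp [String.append_assoc]
    _ = "(" ++ a ++ "<->-" ++ s ++ ")" := by rw [h]

theorem pv_clause2_eq (a v O w : String) :
    "(" ++ a ++ "<->" ++ "(" ++ v ++ O ++ w ++ ")" ++ ")" = "(" ++ a ++ "<->(" ++ v ++ O ++ w ++ "))" := by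
  have h1 : ("<->" : String) ++ "(" = "<->(" := by decide
  have h2 : (")" : String) ++ ")" = "))" := by decide
  calc "(" ++ a ++ "<->" ++ "(" ++ v ++ O ++ w ++ ")" ++ ")"
      = "(" ++ a ++ ("<->" ++ "(") ++ v ++ O ++ w ++ (")" ++ ")") := by simp [String.append_assoc]
    _ = "(" ++ a ++ "<->(" ++ v ++ O ++ w ++ "))" := by rw [h1, h2]

theorem pv_join_eq (l : List String) :
    String.join (l.map (fun cl => "Y" ++ cl)) = l.foldl (fun B X => B ++ ("Y" ++ X)) "" := by
  simp [String.join, List.foldl_map]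

theorem pv_foldl_append_init (a x : String) (l : List String) :
    List.foldl (· ++ ·) (a ++ x) l = a ++ List.foldl (· ++ ·) x l := by
  induction l generalizing x with
  | nil => rfl
  | cons h t ih => simp only [List.foldl_cons, String.append_assoc]; exact ih _

theorem pv_join_cons (a : String) (l : List String) :
    String.join (a :: l) = a ++ String.join l := by
  show List.foldl (· ++ ·) ("" ++ a) l = a ++ List.foldl (· ++ ·) "" l
  rw [show ("" : String) ++ a = a ++ "" by simp, pv_foldl_append_init]

theorem pv_singleton_inj (c d : Char) : String.singleton c = String.singleton d ↔ c = d := by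
  constructor
  · intro h; have := congrArg String.toList h; simpa using this
  · intro h; subst h; rfl
theorem pv_rparen_eq : (")" : String) = String.singleton ')' := by decide
theorem pv_dash_eq : ("-" : String) = String.singleton '-' := by decide

-- proof-side view of B's stage-1 fold as a structural recursion
def pvKindsRec (letras : PySem.Set String) : Bool → String → List Char → List Nat
  | _, _, [] => []
  | pn, pc, c :: cs =>
    if String.singleton c ∈ letras ∧ pc = "-" ∧ pn = false then 0 :: pvKindsRec letras true (String.singleton c) cs
    else if c = ')' then 1 :: pvKindsRec letras false (String.singleton c) cs
    else 2 :: pvKindsRec letras false (String.singleton c) cs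

theorem pv_kinds_acc (letras : PySem.Set String) :
    ∀ (cs : List Char) (ks : List Nat) (pn : Bool) (pc : String),
    (cs.foldl (pvKindStep letras) (ks, pn, pc)).1 = ks ++ pvKindsRec letras pn pc cs := by
  intro cs
  induction cs with
  | nil => intro ks pn pc; simp [pvKindsRec]
  | cons c cs ih =>
    intro ks pn pc
    simp only [List.foldl_cons, pvKindStep, pvKindsRec]
    split_ifs with h1 h2
    · rw [ih]; simp
    · rw [ih]; simp
    · rw [ih]; simp

-- proof-side view of B's deferred clauses: the clause of event e at 1-based index m
def pvEvClause (m : Int) : PvEv → String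
  | .neg s => "(" ++ PySem.Int.toStr m ++ "<->-" ++ s ++ ")"
  | .par v O w => "(" ++ PySem.Int.toStr m ++ "<->(" ++ v ++ O ++ w ++ "))"

def pvRenderFrom : Int → List PvEv → List String
  | _, [] => []
  | m, e :: es => pvEvClause (m + 1) e :: pvRenderFrom (m + 1) es

theorem pv_renderFrom_append :
    ∀ (es : List PvEv) (m : Int) (e : PvEv),
    pvRenderFrom m (es ++ [e]) = pvRenderFrom m es ++ [pvEvClause (m + es.length + 1) e] := by
  intro es
  induction es with
  | nil => intro m e; simp [pvRenderFrom]
  | cons e' es ih =>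
    intro m e
    simp only [List.cons_append, pvRenderFrom, ih, List.length_cons]
    rw [show (m + 1 + (es.length : Int) + 1) = m + ((es.length + 1 : Nat) : Int) + 1 by push_cast; ring]

theorem pvY_eq (X : String) : "Y(" ++ X = "Y" ++ ("(" ++ X) := by
  rw [show ("Y(" : String) = "Y" ++ "(" by decide, String.append_assoc]

theorem pv_Yneg (a s : String) :
    "Y(" ++ a ++ "<->-" ++ s ++ ")" = "Y" ++ ("(" ++ a ++ "<->-" ++ s ++ ")") := by
  simp only [String.append_assoc]
  exact pvY_eq _

theorem pv_Ypar (a v O w : String) :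
    "Y(" ++ a ++ "<->(" ++ v ++ O ++ w ++ "))" = "Y" ++ ("(" ++ a ++ "<->(" ++ v ++ O ++ w ++ "))") := by
  simp only [String.append_assoc]
  exact pvY_eq _

theorem pv_render_fold :
    ∀ (es : List PvEv) (parts : List String) (m : Int),
    es.foldl pvRenderStep (parts, m) = (parts ++ (pvRenderFrom m es).map (fun x => "Y" ++ x), m + es.length) := by
  intro es
  induction es with
  | nil => intro parts m; simp [pvRenderFrom]
  | cons e es ih =>
    intro parts m
    rw [List.foldl_cons]
    cases e with
    | neg s =>
      rw [show pvRenderStep (parts, m) (PvEv.neg s)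
            = (parts ++ ["Y" ++ pvEvClause (m + 1) (PvEv.neg s)], m + 1) by
          simp only [pvRenderStep, pvEvClause]; rw [pv_Yneg]]
      rw [ih]
      simp only [pvRenderFrom, List.map_cons, List.length_cons, List.append_assoc,
        List.singleton_append]
      rw [show (m + 1 + (es.length : Int)) = m + ((es.length + 1 : Nat) : Int) by push_cast; ring]
    | par v O w =>
      rw [show pvRenderStep (parts, m) (PvEv.par v O w)
            = (parts ++ ["Y" ++ pvEvClause (m + 1) (PvEv.par v O w)], m + 1) by
          simp only [pvRenderStep, pvEvClause]; rw [pv_Ypar]]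
      rw [ih]
      simp only [pvRenderFrom, List.map_cons, List.length_cons, List.append_assoc,
        List.singleton_append]
      rw [show (m + 1 + (es.length : Int)) = m + ((es.length + 1 : Nat) : Int) by push_cast; ring]

-- the joint invariant: A's loop, B's stage-1 kind stream and B's stage-2 fold advance in
-- lock step (names = Pila, n = I + 1 = number of events, L = the rendered events)
theorem pv_main (letras : List String) (hlet : ∀ t ∈ pvLPB, t ∉ letras) :
    ∀ (rest : List Char) (stackA : List String) (events : List PvEv) (i : Int) (tm pn : Bool) (pc : String) (fuel : Nat) (s : String),
    (∀ c cs, rest = c :: cs → s = String.singleton c) →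
    2 * rest.length + 1 ≤ fuel →
    0 ≤ i → i ≤ 99 →
    i = (events.length : Int) →
    tm = decide (stackA.getLast? = some "-") →
    (stackA.getLast? = some "-" ↔ (pc = "-" ∧ pn = false)) →
    preScan letras rest (stackA.length : Int) tm i = true →
    ∃ (events' : List PvEv) (names' : List String) (j : Int),
      List.foldl pvStep2 (some (events, stackA, i)) (rest.zip (pvKindsRec (PySem.Set.ofList letras) pn pc rest)) = some (events', names', j) ∧
      TseitinLoop letras fuel rest s stackA (pvRenderFrom 0 events) (i - 1) = some (names', pvRenderFrom 0 events', j - 1) ∧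
      i ≤ j ∧ j ≤ 99 ∧ j = (events'.length : Int) := by
  intro rest
  induction rest with
  | nil =>
    intro stackA events i tm pn pc fuel s hs hfuel h0 h99 hev htm hbr hscan
    obtain ⟨f, rfl⟩ : ∃ f, fuel = f + 1 := ⟨fuel - 1, by omega⟩
    exact ⟨events, stackA, i, by simp [pvKindsRec], by simp [TseitinLoop], le_refl _, h99, hev⟩
  | cons c cs ih =>
    intro stackA events i tm pn pc fuel s hs hfuel h0 h99 hev htm hbr hscan
    obtain ⟨f, rfl⟩ : ∃ f, fuel = f + 1 := ⟨fuel - 1, by omega⟩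
    have hfuel' : 2 * cs.length + 1 ≤ f := by simp only [List.length_cons] at hfuel; omega
    have hsc : s = String.singleton c := hs c cs rfl
    subst hsc
    simp only [preScan] at hscan
    by_cases hb1 : String.singleton c ∈ letras ∧ tm = true
    · -- the negation-of-a-letter step (kind 0)
      rw [if_pos hb1] at hscan
      obtain ⟨hmem, htm'⟩ := hb1
      have hlast : stackA.getLast? = some "-" := of_decide_eq_true (htm ▸ htm')
      obtain ⟨hpc, hpn⟩ := hbr.mp hlast
      cases hrev : stackA.reverse with
      | nil =>
        rw [List.reverse_eq_nil_iff] at hrev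
        subst hrev; simp at hlast
      | cons a t =>
        have ha : a = "-" := by
          have hh := List.head?_reverse (l := stackA)
          rw [hrev, hlast] at hh
          simpa using hh
        subst ha
        have hstack : stackA = t.reverse ++ ["-"] := by
          rw [← List.reverse_reverse stackA, hrev]; simp
        simp only [Bool.and_eq_true, decide_eq_true_eq] at hscan
        obtain ⟨hi99, hrec⟩ := hscan
        have hatom := pvLPB_get i h0 (by omega)
        have hatom_mem := pvLPB_mem i h0 (by omega)
        have hatom_ne : PySem.Int.toStr (i + 1) ≠ "-" := fun h => pvLPB_no_symbols.1 (h ▸ hatom_mem)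
        have hkind : pvKindsRec (PySem.Set.ofList letras) pn pc (c :: cs)
            = 0 :: pvKindsRec (PySem.Set.ofList letras) true (String.singleton c) cs := by
          simp only [pvKindsRec]
          rw [if_pos ⟨(PySem.Set.mem_ofList _ _).mpr hmem, hpc, hpn⟩]
        have hBstep : pvStep2 (some (events, stackA, i)) (c, 0)
            = some (events ++ [PvEv.neg (String.singleton c)], t.reverse ++ [PySem.Int.toStr (i + 1)], i + 1) := by
          simp [pvStep2, hrev]
        have hbr2 : (t.reverse ++ [PySem.Int.toStr (i + 1)]).getLast? = some "-" ↔
            (String.singleton c = "-" ∧ (true : Bool) = false) := by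
          rw [List.getLast?_concat]; simp [hatom_ne]
        have htm2 : (false : Bool) = decide ((t.reverse ++ [PySem.Int.toStr (i + 1)]).getLast? = some "-") := by
          rw [List.getLast?_concat]; simp [hatom_ne]
        have hlen' : ((t.reverse ++ [PySem.Int.toStr (i + 1)]).length : Int) = (stackA.length : Int) := by
          rw [hstack]; simp
        obtain ⟨ev', st', j, hB, hA, hij, hj99, hjev⟩ :=
          ih (t.reverse ++ [PySem.Int.toStr (i + 1)]) (events ++ [PvEv.neg (String.singleton c)])
            (i + 1) false true (String.singleton c) f (pvNextS cs (String.singleton c))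
            (by intro c' cs' h; subst h; rfl) hfuel' (by omega) (by omega)
            (by simp [hev]) htm2 hbr2
            (by rw [hlen']; exact hrec)
        refine ⟨ev', st', j, ?_, ?_, by omega, hj99, hjev⟩
        · rw [hkind, List.zip_cons_cons, List.foldl_cons, hBstep]; exact hB
        · simp only [TseitinLoop]
          rw [if_pos (by simp)]
          rw [if_pos ⟨hmem, by rw [hstack]; simp, by rw [PySem.List.pyGet?_neg_one]; exact hlast⟩]
          rw [show (i - 1 + 1 : Int) = i by ring, hatom]
          simp only [PySem.List.slice_to_neg_one]
          rw [show stackA.dropLast = t.reverse by rw [hstack]; exact List.dropLast_concat ..]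
          rw [pv_clause1_eq]
          rw [show pvRenderFrom 0 events ++ ["(" ++ PySem.Int.toStr (i + 1) ++ "<->-" ++ String.singleton c ++ ")"]
              = pvRenderFrom 0 (events ++ [PvEv.neg (String.singleton c)]) by
            rw [pv_renderFrom_append]
            simp only [pvEvClause]
            rw [show ((0 : Int) + events.length + 1) = i + 1 by omega]]
          rw [show (i + 1 - 1 : Int) = i by ring] at hA
          rw [show List.drop 1 (c :: cs) = cs from rfl]
          exact hA
    · rw [if_neg hb1] at hscan
      have hnot1A : ¬(String.singleton c ∈ letras ∧ 0 < stackA.length ∧ PySem.List.pyGet? stackA (-1) = some "-") := by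
        rintro ⟨hm, -, hg⟩
        rw [PySem.List.pyGet?_neg_one] at hg
        exact hb1 ⟨hm, by rw [htm, hg]; simp⟩
      have hnotK : ¬(String.singleton c ∈ PySem.Set.ofList letras ∧ pc = "-" ∧ pn = false) := by
        rintro ⟨hm, hpc, hpn⟩
        exact hb1 ⟨(PySem.Set.mem_ofList _ _).mp hm, by rw [htm, hbr.mpr ⟨hpc, hpn⟩]; simp⟩
      by_cases hc : c = ')'
      · -- the `)` reduction step (kind 1)
        subst hc
        rw [if_pos rfl] at hscan
        simp only [Bool.and_eq_true, decide_eq_true_eq] at hscan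
        obtain ⟨hsz, hi99, hrec⟩ := hscan
        have hlen4 : 4 ≤ stackA.length := by exact_mod_cast hsz
        obtain ⟨w, O, v, g, rs, hrev⟩ : ∃ w O v g rs, stackA.reverse = w :: O :: v :: g :: rs := by
          have h4 : 4 ≤ stackA.reverse.length := by simpa using hlen4
          match hr : stackA.reverse with
          | w :: O :: v :: g :: rs => exact ⟨w, O, v, g, rs, rfl⟩
          | [] | [_] | [_, _] | [_, _, _] => rw [hr] at h4; simp at h4
        have hstack : stackA = rs.reverse ++ [g, v, O, w] := by
          rw [← List.reverse_reverse stackA, hrev]; simp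
        subst hstack
        have hg1 : PySem.List.pyGet? (rs.reverse ++ [g, v, O, w]) (-1) = some w := by
          rw [PySem.List.pyGet?_neg_one]
          rw [show rs.reverse ++ [g, v, O, w] = (rs.reverse ++ [g, v, O]) ++ [w] by simp]
          exact List.getLast?_concat
        have hg2 : PySem.List.pyGet? (rs.reverse ++ [g, v, O, w]) (-2) = some O := by
          rw [PySem.List.pyGet?_neg_ofNat _ 2 (by omega) (by simp)]
          rw [List.getElem?_append_right (by simp)]
          simp
        have hg3 : PySem.List.pyGet? (rs.reverse ++ [g, v, O, w]) (-3) = some v := by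
          rw [PySem.List.pyGet?_neg_ofNat _ 3 (by omega) (by simp)]
          rw [List.getElem?_append_right (by simp)]
          simp
        have hslice : PySem.List.slice (rs.reverse ++ [g, v, O, w]) none (some (((rs.reverse ++ [g, v, O, w]).length : Int) - 4)) = rs.reverse := by
          have h0' : (0:Int) ≤ ((rs.reverse ++ [g, v, O, w]).length : Int) - 4 := by simp
          rw [PySem.List.slice_to _ h0']
          rw [show (((rs.reverse ++ [g, v, O, w]).length : Int) - 4).toNat = rs.length by simp]
          rw [List.take_left' (by simp)]
        have hatom := pvLPB_get i h0 (by omega)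
        have hatom_mem := pvLPB_mem i h0 (by omega)
        have hatom_nmem : PySem.Int.toStr (i + 1) ∉ letras := hlet _ hatom_mem
        have hatom_ne : PySem.Int.toStr (i + 1) ≠ "-" := fun h => pvLPB_no_symbols.1 (h ▸ hatom_mem)
        have hatom_np : PySem.Int.toStr (i + 1) ≠ ")" := fun h => pvLPB_no_symbols.2 (h ▸ hatom_mem)
        have hkind : pvKindsRec (PySem.Set.ofList letras) pn pc (')' :: cs)
            = 1 :: pvKindsRec (PySem.Set.ofList letras) false (String.singleton ')') cs := by
          simp only [pvKindsRec]
          rw [if_neg hnotK]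
          simp
        have hBstep : pvStep2 (some (events, rs.reverse ++ [g, v, O, w], i)) (')', 1)
            = some (events ++ [PvEv.par v O w], rs.reverse ++ [PySem.Int.toStr (i + 1)], i + 1) := by
          simp [pvStep2, hrev]
        obtain ⟨f', rfl⟩ : ∃ f', f = f' + 1 := ⟨f - 1, by omega⟩
        have hbr2 : (rs.reverse ++ [PySem.Int.toStr (i + 1)]).getLast? = some "-" ↔
            (String.singleton ')' = "-" ∧ (false : Bool) = false) := by
          rw [List.getLast?_concat]
          simp [hatom_ne, show String.singleton ')' ≠ "-" by decide]
        have htm2 : (false : Bool) = decide ((rs.reverse ++ [PySem.Int.toStr (i + 1)]).getLast? = some "-") := by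
          rw [List.getLast?_concat]; simp [hatom_ne]
        have hlen' : ((rs.reverse ++ [PySem.Int.toStr (i + 1)]).length : Int) = ((rs.reverse ++ [g, v, O, w]).length : Int) - 3 := by
          simp only [List.length_append, List.length_reverse, List.length_cons, List.length_nil]
          push_cast
          ring
        obtain ⟨ev', st', j, hB, hA, hij, hj99, hjev⟩ :=
          ih (rs.reverse ++ [PySem.Int.toStr (i + 1)]) (events ++ [PvEv.par v O w])
            (i + 1) false false (String.singleton ')') f' (pvNextS cs (PySem.Int.toStr (i + 1)))
            (by intro c' cs' h; subst h; rfl) (by simp only [List.length_cons] at hfuel; omega)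
            (by omega) (by omega) (by simp [hev]) htm2 hbr2
            (by rw [hlen']; exact hrec)
        refine ⟨ev', st', j, ?_, ?_, by omega, hj99, hjev⟩
        · rw [hkind, List.zip_cons_cons, List.foldl_cons, hBstep]; exact hB
        · -- first loop iteration: the `)` reduction
          have hstep1 : TseitinLoop letras (f' + 1 + 1) (')' :: cs) (String.singleton ')') (rs.reverse ++ [g, v, O, w]) (pvRenderFrom 0 events) (i - 1)
              = TseitinLoop letras (f' + 1) (')' :: cs) (PySem.Int.toStr (i + 1))
                  (PySem.List.slice (rs.reverse ++ [g, v, O, w]) none (some (((rs.reverse ++ [g, v, O, w]).length : Int) - 4)))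
                  (pvRenderFrom 0 events ++ ["(" ++ PySem.Int.toStr (i + 1) ++ "<->" ++ "(" ++ v ++ O ++ w ++ ")" ++ ")"]) i := by
            conv_lhs => rw [TseitinLoop]
            rw [if_pos (by simp), if_neg hnot1A, if_pos pv_rparen_eq.symm, hg1, hg2, hg3]
            rw [show (i - 1 + 1 : Int) = i by ring, hatom]
          -- second loop iteration: pushing the fresh atom, consuming ')'
          have hstep2 : TseitinLoop letras (f' + 1) (')' :: cs) (PySem.Int.toStr (i + 1))
                  (PySem.List.slice (rs.reverse ++ [g, v, O, w]) none (some (((rs.reverse ++ [g, v, O, w]).length : Int) - 4)))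
                  (pvRenderFrom 0 events ++ ["(" ++ PySem.Int.toStr (i + 1) ++ "<->" ++ "(" ++ v ++ O ++ w ++ ")" ++ ")"]) i
              = TseitinLoop letras f' cs (pvNextS cs (PySem.Int.toStr (i + 1)))
                  (rs.reverse ++ [PySem.Int.toStr (i + 1)])
                  (pvRenderFrom 0 events ++ ["(" ++ PySem.Int.toStr (i + 1) ++ "<->" ++ "(" ++ v ++ O ++ w ++ ")" ++ ")"]) i := by
            conv_lhs => rw [TseitinLoop]
            rw [if_pos (by simp)]
            rw [if_neg (by rintro ⟨hm, -, -⟩; exact hatom_nmem hm)]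
            rw [if_neg hatom_np, hslice]
            rfl
          rw [hstep1, hstep2, pv_clause2_eq]
          rw [show pvRenderFrom 0 events ++ ["(" ++ PySem.Int.toStr (i + 1) ++ "<->(" ++ v ++ O ++ w ++ "))"]
              = pvRenderFrom 0 (events ++ [PvEv.par v O w]) by
            rw [pv_renderFrom_append]
            simp only [pvEvClause]
            rw [show ((0 : Int) + events.length + 1) = i + 1 by omega]]
          rw [show (i + 1 - 1 : Int) = i by ring] at hA
          exact hA
      · -- an ordinary push step (kind 2)
        have hcs : String.singleton c ≠ ")" := fun h => hc ((pv_singleton_inj c ')').mp (h.trans pv_rparen_eq))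
        rw [if_neg hc] at hscan
        have hkind : pvKindsRec (PySem.Set.ofList letras) pn pc (c :: cs)
            = 2 :: pvKindsRec (PySem.Set.ofList letras) false (String.singleton c) cs := by
          simp only [pvKindsRec]
          rw [if_neg hnotK, if_neg hc]
        have hBstep : pvStep2 (some (events, stackA, i)) (c, 2)
            = some (events, stackA ++ [String.singleton c], i) := by
          simp [pvStep2]
        have htm2 : (c == '-') = decide ((stackA ++ [String.singleton c]).getLast? = some "-") := by
          rw [List.getLast?_concat]
          rcases Decidable.eq_or_ne c '-' with h | h
          · subst h; simp [pv_dash_eq]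
          · have hne : String.singleton c ≠ "-" := fun hh => h ((pv_singleton_inj c '-').mp (hh.trans pv_dash_eq))
            simp [h, hne]
        have hbr2 : (stackA ++ [String.singleton c]).getLast? = some "-" ↔
            (String.singleton c = "-" ∧ (false : Bool) = false) := by
          rw [List.getLast?_concat]; simp
        have hlen' : ((stackA ++ [String.singleton c]).length : Int) = (stackA.length : Int) + 1 := by simp
        obtain ⟨ev', st', j, hB, hA, hij, hj99, hjev⟩ :=
          ih (stackA ++ [String.singleton c]) events i (c == '-') false (String.singleton c) f
            (pvNextS cs (String.singleton c))
            (by intro c' cs' h; subst h; rfl) hfuel' h0 h99 hev htm2 hbr2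
            (by rw [hlen']; exact hscan)
        refine ⟨ev', st', j, ?_, ?_, hij, hj99, hjev⟩
        · rw [hkind, List.zip_cons_cons, List.foldl_cons, hBstep]; exact hB
        · simp only [TseitinLoop]
          rw [if_pos (by simp)]
          rw [if_neg hnot1A, if_neg hcs]
          rw [show List.drop 1 (c :: cs) = cs from rfl]
          exact hA

-- ===== VERDICT (by name: the statement is the Claim_ definition above) =====
theorem Tseitin_spec : Claim_equal_Tseitin := by
  unfold Claim_equal_Tseitin
  intro A letras _ hpre
  unfold Spec_Tseitin
  obtain ⟨hne, hlet, hscan⟩ := hpre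
  obtain ⟨c, cs, hA⟩ : ∃ c cs, A.toList = c :: cs := by
    cases h : A.toList with
    | nil => exact absurd h hne
    | cons c cs => exact ⟨c, cs, rfl⟩
  rw [hA] at hscan
  have hscan' : preScan letras (c :: cs) ((([] : List String).length : Nat) : Int) false 0 = true := by
    simpa using hscan
  obtain ⟨ev', st', j, hB, hAres, hij, hj99, hjev⟩ :=
    pv_main letras hlet (c :: cs) [] [] 0 false false "" (2 * (c :: cs).length + 2) (String.singleton c)
      (by intro c' cs' h; cases h; rfl) (by simp) le_rfl (by omega) (by simp)
      (by simp) (by simp) hscan'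
  have hAres' : TseitinLoop letras (2 * (c :: cs).length + 2) (c :: cs) (String.singleton c) [] [] (-1) = some (st', pvRenderFrom 0 ev', j - 1) := by
    simpa [pvRenderFrom] using hAres
  have hkinds : (A.toList.foldl (pvKindStep (PySem.Set.ofList letras)) ([], false, "")).1
      = pvKindsRec (PySem.Set.ofList letras) false "" A.toList := by
    rw [pv_kinds_acc]; simp
  unfold Tseitin Tseitin_alt
  rw [hA] at hkinds ⊢
  rw [hkinds]
  simp only [hAres', hB]
  rcases eq_or_lt_of_le hij with hj0 | hjpos
  · have hev0 : ev' = [] := by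
      rw [← List.length_eq_zero_iff]
      omega
    subst hev0
    rw [if_pos (by omega), if_pos (by omega)]
    cases hg : PySem.List.pyGet? st' (-1) with
    | none => rfl
    | some a => simp [pvRenderFrom, String.join]
  · rw [if_neg (by omega), if_neg (by omega)]
    rw [pvLPB_get (j - 1) (by omega) (by omega)]
    rw [show (j - 1 + 1 : Int) = j by ring]
    show PySem.Int.toStr j ++ List.foldl (fun B X => B ++ ("Y" ++ X)) "" (pvRenderFrom 0 ev')
        = String.join (List.foldl pvRenderStep ([PySem.Int.toStr j], 0) ev').1
    rw [pv_render_fold]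
    simp only [List.singleton_append]
    rw [pv_join_cons, pv_join_eq]
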